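-- pv_equiv track=rewrite | github.com/okareo-ai/okareo-python-sdk | build_docs_postprocess.py | _clean_md_file
-- ===== SOURCE A (Python) =====
-- def _clean_md_file(content: list[str], sidebar_position: int) -> list[str]:
--     # Convert header order
--     added_order = False
--     new_content = []
--     for line in content:
--         if line.startswith("#### "):
--             new_content.append("###" + line[4:])  # Convert H4 to H2
--         elif line.startswith("title: okareo.okareo"):
--             line = line.replace("okareo.okareo", "okareo")  # Fix title for okareo.md
--         else:
--             new_content.append(line)
--             if line.startswith("---") and not added_order:
--                 new_content.append(f"sidebar_position: {sidebar_position}\n")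
--                 added_order = True
--     return new_content
-- ===== SOURCE B (Python) =====
-- def _clean_md_file(content: list[str], sidebar_position: int) -> list[str]:
--     # One comprehension builds the rewritten lines (titles dropped, H4->H2);
--     # a separate scan inserts the sidebar_position line after the first '---' line.
--     out = ["###" + line[4:] if line.startswith("#### ") else line
--            for line in content
--            if not line.startswith("title: okareo.okareo")]
--     for i, line in enumerate(out):
--         if line.startswith("---"):
--             out.insert(i + 1, f"sidebar_position: {sidebar_position}\n")
--             break
--     return out
-- ===== Notes on version B (the rewrite author's own statement) =====
-- stated objective: simpler
-- what changed: Replaces the single stateful loop with an added_order flag by a stateless filter/map comprehension followed by a separate find-first-'---'-and-insert pass.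
import Mathlib
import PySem

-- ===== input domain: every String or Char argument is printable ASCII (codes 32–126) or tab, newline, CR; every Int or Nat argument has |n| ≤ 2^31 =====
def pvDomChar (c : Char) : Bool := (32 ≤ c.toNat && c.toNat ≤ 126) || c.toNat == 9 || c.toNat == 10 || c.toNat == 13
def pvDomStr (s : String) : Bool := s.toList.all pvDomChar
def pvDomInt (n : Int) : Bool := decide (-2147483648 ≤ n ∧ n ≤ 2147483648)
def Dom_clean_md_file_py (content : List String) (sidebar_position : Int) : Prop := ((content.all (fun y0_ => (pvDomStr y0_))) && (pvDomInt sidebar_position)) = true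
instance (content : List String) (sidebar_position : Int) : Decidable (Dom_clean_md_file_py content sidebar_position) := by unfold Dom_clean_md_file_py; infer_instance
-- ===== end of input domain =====

-- B replaces A's single stateful loop (added_order flag) by a stateless filter/map pass
-- followed by a separate find-first-'---'-and-insert pass (objective: simpler).

-- ===== PORT A =====
-- loop body of A's for-loop: state = (added_order, new_content)
def pvStepA (sidebar_position : Int) (st : Bool × List String) (line : String) :
    Bool × List String :=
  if PySem.Str.startswith line "#### " then
    (st.1, st.2 ++ ["###" ++ PySem.Str.slice line (some 4) none])
  else if PySem.Str.startswith line "title: okareo.okareo" then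
    st  -- line is rebound by replace but never appended
  else if PySem.Str.startswith line "---" && !st.1 then
    (true, st.2 ++ [line] ++ ["sidebar_position: " ++ PySem.Int.toStr sidebar_position ++ "\n"])
  else (st.1, st.2 ++ [line])

def clean_md_file_py (content : List String) (sidebar_position : Int) : List String :=
  (content.foldl (pvStepA sidebar_position) (false, ([] : List String))).2

-- ===== PORT B =====
-- the comprehension of Source B: filter out title lines, map H4 lines to H3
def pvPass1 (content : List String) : List String :=
  (content.filter (fun line => !PySem.Str.startswith line "title: okareo.okareo")).map
    (fun line =>
      if PySem.Str.startswith line "#### " then "###" ++ PySem.Str.slice line (some 4) none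
      else line)

-- the 'for i, line in enumerate(out): if line.startswith("---"): …; break' scan
def pvFindDash : List String → Nat → Option Nat
  | [], _ => none
  | l :: rest, i =>
      if PySem.Str.startswith l "---" then some i else pvFindDash rest (i + 1)

def clean_md_file_py_alt (content : List String) (sidebar_position : Int) : List String :=
  let out := pvPass1 content
  match pvFindDash out 0 with
  | some i => PySem.List.insert out ((i : Int) + 1)
      ("sidebar_position: " ++ PySem.Int.toStr sidebar_position ++ "\n")
  | none => out

-- ===== PRECONDITION & SPEC =====
def Spec_clean_md_file_py (content : List String) (sidebar_position : Int) (out : List String) : Prop := out = clean_md_file_py_alt content sidebar_position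
instance (content : List String) (sidebar_position : Int) (out : List String) : Decidable (Spec_clean_md_file_py content sidebar_position out) := by unfold Spec_clean_md_file_py; infer_instance

-- ===== CLAIM (what is proved, stated in full; the proofs are below) =====
def Claim_equal_clean_md_file_py : Prop := ∀ (content : List String) (sidebar_position : Int), Dom_clean_md_file_py content sidebar_position → Spec_clean_md_file_py content sidebar_position (clean_md_file_py content sidebar_position)

-- ===== LEMMAS AND PROOFS =====

-- recursive characterisation of A's loop (suffix appended from a given flag state)
def pvGoA (sb : String) : Bool → List String → List String
  | _, [] => []
  | b, l :: ls =>
      if PySem.Str.startswith l "#### " then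
        ("###" ++ PySem.Str.slice l (some 4) none) :: pvGoA sb b ls
      else if PySem.Str.startswith l "title: okareo.okareo" then
        pvGoA sb b ls
      else if PySem.Str.startswith l "---" && !b then
        l :: sb :: pvGoA sb true ls
      else
        l :: pvGoA sb b ls

-- recursive characterisation of B's insertion pass
def pvInsAfter (sb : String) : List String → List String
  | [] => []
  | l :: rest =>
      if PySem.Str.startswith l "---" then l :: sb :: rest
      else l :: pvInsAfter sb rest

lemma pv_ne_dash (t : List Char) :
    PySem.Chars.startswith ('#' :: '#' :: '#' :: t) ['-', '-', '-'] = false := by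
  simp [PySem.Chars.startswith, List.isPrefixOf]

lemma pv_h4_not_title (s : String)
    (h : PySem.Str.startswith s "#### " = true) :
    PySem.Str.startswith s "title: okareo.okareo" = false := by
  rcases hs : s.toList with _ | ⟨c, rest⟩ <;>
    simp [hs, PySem.Chars.startswith, List.isPrefixOf] at h ⊢
  · exact fun hc => absurd (hc ▸ h.1) (by decide)

-- step-function reductions (branch by branch, as rewrite rules)
lemma pv_stepA_h4 (sp : Int) (st : Bool × List String) (l : String)
    (h1 : PySem.Str.startswith l "#### " = true) :
    pvStepA sp st l = (st.1, st.2 ++ ["###" ++ PySem.Str.slice l (some 4) none]) := by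
  unfold pvStepA; rw [if_pos h1]

lemma pv_stepA_title (sp : Int) (st : Bool × List String) (l : String)
    (h1 : ¬ PySem.Str.startswith l "#### " = true)
    (h2 : PySem.Str.startswith l "title: okareo.okareo" = true) :
    pvStepA sp st l = st := by
  unfold pvStepA; rw [if_neg h1, if_pos h2]

lemma pv_stepA_dash (sp : Int) (st : Bool × List String) (l : String)
    (h1 : ¬ PySem.Str.startswith l "#### " = true)
    (h2 : ¬ PySem.Str.startswith l "title: okareo.okareo" = true)
    (h3 : (PySem.Str.startswith l "---" && !st.1) = true) :
    pvStepA sp st l =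
      (true, st.2 ++ [l] ++ ["sidebar_position: " ++ PySem.Int.toStr sp ++ "\n"]) := by
  unfold pvStepA; rw [if_neg h1, if_neg h2, if_pos h3]

lemma pv_stepA_keep (sp : Int) (st : Bool × List String) (l : String)
    (h1 : ¬ PySem.Str.startswith l "#### " = true)
    (h2 : ¬ PySem.Str.startswith l "title: okareo.okareo" = true)
    (h3 : ¬ (PySem.Str.startswith l "---" && !st.1) = true) :
    pvStepA sp st l = (st.1, st.2 ++ [l]) := by
  unfold pvStepA; rw [if_neg h1, if_neg h2, if_neg h3]

-- pvPass1 cons reductions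
lemma pv_pass1_h4 (l : String) (ls : List String)
    (h1 : PySem.Str.startswith l "#### " = true) :
    pvPass1 (l :: ls) = ("###" ++ PySem.Str.slice l (some 4) none) :: pvPass1 ls := by
  simp only [pvPass1, List.filter_cons]
  rw [if_pos (show (!PySem.Str.startswith l "title: okareo.okareo") = true by
        rw [pv_h4_not_title l h1]; rfl),
      List.map_cons, if_pos h1]

lemma pv_pass1_title (l : String) (ls : List String)
    (h2 : PySem.Str.startswith l "title: okareo.okareo" = true) :
    pvPass1 (l :: ls) = pvPass1 ls := by
  simp only [pvPass1, List.filter_cons]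
  rw [if_neg (show ¬ (!PySem.Str.startswith l "title: okareo.okareo") = true by
        simpa using h2)]

lemma pv_pass1_keep (l : String) (ls : List String)
    (h1 : ¬ PySem.Str.startswith l "#### " = true)
    (h2 : ¬ PySem.Str.startswith l "title: okareo.okareo" = true) :
    pvPass1 (l :: ls) = l :: pvPass1 ls := by
  simp only [pvPass1, List.filter_cons]
  rw [if_pos (show (!PySem.Str.startswith l "title: okareo.okareo") = true by
        simpa using h2),
      List.map_cons, if_neg h1]

-- A's foldl equals the recursive pvGoA
lemma pv_foldl_goA (sb : String) (sidebar_position : Int)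
    (hsb : sb = "sidebar_position: " ++ PySem.Int.toStr sidebar_position ++ "\n") :
    ∀ (ls : List String) (b : Bool) (acc : List String),
      (ls.foldl (pvStepA sidebar_position) (b, acc)).2 = acc ++ pvGoA sb b ls := by
  intro ls
  induction ls with
  | nil => intro b acc; simp [pvGoA]
  | cons l ls ih =>
      intro b acc
      rw [List.foldl_cons]
      by_cases h1 : PySem.Str.startswith l "#### " = true
      · rw [pv_stepA_h4 sidebar_position (b, acc) l h1, ih]
        simp only [pvGoA]; rw [if_pos h1]; simp
      · by_cases h2 : PySem.Str.startswith l "title: okareo.okareo" = true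
        · rw [pv_stepA_title sidebar_position (b, acc) l h1 h2, ih]
          simp only [pvGoA]; rw [if_neg h1, if_pos h2]
        · by_cases h3 : (PySem.Str.startswith l "---" && !b) = true
          · rw [pv_stepA_dash sidebar_position (b, acc) l h1 h2 h3, ih]
            simp only [pvGoA]; rw [if_neg h1, if_neg h2, if_pos h3, hsb]; simp
          · rw [pv_stepA_keep sidebar_position (b, acc) l h1 h2 h3, ih]
            simp only [pvGoA]; rw [if_neg h1, if_neg h2, if_neg h3]; simp

-- once the flag is set, A just produces B's first pass
lemma pv_goA_true (sb : String) : ∀ ls : List String, pvGoA sb true ls = pvPass1 ls := by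
  intro ls
  induction ls with
  | nil => simp [pvGoA, pvPass1]
  | cons l ls ih =>
      by_cases h1 : PySem.Str.startswith l "#### " = true
      · rw [pv_pass1_h4 l ls h1]
        simp only [pvGoA]; rw [if_pos h1, ih]
      · by_cases h2 : PySem.Str.startswith l "title: okareo.okareo" = true
        · rw [pv_pass1_title l ls h2]
          simp only [pvGoA]; rw [if_neg h1, if_pos h2, ih]
        · rw [pv_pass1_keep l ls h1 h2]
          simp only [pvGoA]
          rw [if_neg h1, if_neg h2,
              if_neg (show ¬ (PySem.Str.startswith l "---" && !true) = true by simp), ih]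

-- before the flag is set, A produces B's first pass with sb inserted after the first '---' line
lemma pv_goA_false (sb : String) : ∀ ls : List String,
    pvGoA sb false ls = pvInsAfter sb (pvPass1 ls) := by
  intro ls
  induction ls with
  | nil => simp [pvGoA, pvPass1, pvInsAfter]
  | cons l ls ih =>
      by_cases h1 : PySem.Str.startswith l "#### " = true
      · rw [pv_pass1_h4 l ls h1]
        simp only [pvGoA, pvInsAfter]
        rw [if_pos h1,
            if_neg (show ¬ PySem.Str.startswith
                ("###" ++ PySem.Str.slice l (some 4) none) "---" = true by
              simp [pv_ne_dash]),
            ih]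
      · by_cases h2 : PySem.Str.startswith l "title: okareo.okareo" = true
        · rw [pv_pass1_title l ls h2]
          simp only [pvGoA]; rw [if_neg h1, if_pos h2, ih]
        · by_cases hd : PySem.Str.startswith l "---" = true
          · rw [pv_pass1_keep l ls h1 h2]
            simp only [pvGoA, pvInsAfter]
            rw [if_neg h1, if_neg h2,
                if_pos (show (PySem.Str.startswith l "---" && !false) = true by
                  rw [hd]; rfl),
                if_pos hd, pv_goA_true]
          · rw [pv_pass1_keep l ls h1 h2]
            simp only [pvGoA, pvInsAfter]
            rw [if_neg h1, if_neg h2,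
                if_neg (show ¬ (PySem.Str.startswith l "---" && !false) = true by
                  simpa using hd),
                if_neg hd, ih]

lemma pv_findDash_bound : ∀ (p : List String) (n i : Nat),
    pvFindDash p n = some i → i < n + p.length := by
  intro p
  induction p with
  | nil => intro n i h; simp [pvFindDash] at h
  | cons l p ih =>
      intro n i h
      simp only [pvFindDash] at h
      by_cases hd : PySem.Str.startswith l "---" = true
      · rw [if_pos hd] at h
        injection h with h
        simp only [List.length_cons]; omega
      · rw [if_neg hd] at h
        have := ih (n + 1) i h
        simp only [List.length_cons]; omega

lemma pv_findDash_shift : ∀ (p : List String) (n : Nat),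
    pvFindDash p (n + 1) = (pvFindDash p n).map (· + 1) := by
  intro p
  induction p with
  | nil => intro n; simp [pvFindDash]
  | cons l p ih =>
      intro n
      simp only [pvFindDash]
      by_cases hd : PySem.Str.startswith l "---" = true
      · rw [if_pos hd, if_pos hd]; rfl
      · rw [if_neg hd, if_neg hd, ih (n + 1)]

lemma pv_insert_cons_succ (x : String) (xs : List String) (n : Nat) (v : String)
    (h : n ≤ xs.length) :
    PySem.List.insert (x :: xs) ((n : Int) + 1) v = x :: PySem.List.insert xs (n : Int) v := by
  have h1 : ((n : Int) + 1) = (((n + 1 : Nat)) : Int) := by push_cast; ring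
  rw [h1, PySem.List.insert_natCast _ _ _ (by simp; omega),
      PySem.List.insert_natCast _ _ _ h]
  simp

-- B's match-and-insert equals the recursive pvInsAfter
lemma pv_match_insAfter (sb : String) : ∀ p : List String,
    (match pvFindDash p 0 with
     | some i => PySem.List.insert p ((i : Int) + 1) sb
     | none => p) = pvInsAfter sb p := by
  intro p
  induction p with
  | nil => simp [pvFindDash, pvInsAfter]
  | cons l p ih =>
      simp only [pvFindDash, pvInsAfter]
      by_cases hd : PySem.Str.startswith l "---" = true
      · rw [if_pos hd, if_pos hd]
        show PySem.List.insert (l :: p) (((0 : Nat) : Int) + 1) sb = l :: sb :: p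
        rw [show (((0 : Nat) : Int) + 1) = ((1 : Nat) : Int) by norm_num,
            PySem.List.insert_natCast _ _ _ (by simp)]
        simp
      · rw [if_neg hd, if_neg hd, pv_findDash_shift p 0]
        cases hp : pvFindDash p 0 with
        | none =>
            rw [hp] at ih
            have ih' : p = pvInsAfter sb p := ih
            simp [← ih']
        | some i =>
            rw [hp] at ih
            have ih' : PySem.List.insert p ((i : Int) + 1) sb = pvInsAfter sb p := ih
            simp only [Option.map_some]
            have hb : i + 1 ≤ p.length := by
              have := pv_findDash_bound p 0 i hp; omega
            show PySem.List.insert (l :: p) (((i + 1 : Nat) : Int) + 1) sb = l :: pvInsAfter sb p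
            rw [pv_insert_cons_succ l p (i + 1) sb hb,
                show ((i + 1 : Nat) : Int) = ((i : Int) + 1) by push_cast; ring, ih']

-- ===== VERDICT (by name: the statement is the Claim_ definition above) =====
theorem clean_md_file_py_spec : Claim_equal_clean_md_file_py := by
  intro content sidebar_position _
  unfold Spec_clean_md_file_py clean_md_file_py clean_md_file_py_alt
  set sb := "sidebar_position: " ++ PySem.Int.toStr sidebar_position ++ "\n" with hsb
  rw [pv_foldl_goA sb sidebar_position hsb content false [], List.nil_append,
      pv_goA_false sb content, ← pv_match_insAfter sb (pvPass1 content)]
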